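-- pv_equiv track=rewrite | github.com/robotdiary/algo | 2023/boj_1941_소문난칠공주.py | check_seat
-- ===== SOURCE A (Python) =====
-- def check_seat(x):
--     stack = [(x[0][0], x[0][1])]
--     visited = {(x[0][0], x[0][1])}
--     while stack:
--         cr, cc = stack.pop()
--         for dr, dc in (1, 0), (0, 1), (-1, 0), (0, -1):
--             if (cr + dr, cc + dc) in x and (cr + dr, cc + dc) not in visited:
--                 stack.append((cr + dr, cc + dc))
--                 visited.add((cr + dr, cc + dc))
--
--     if len(visited) == 7:
--         return 1
--     else:
--         return 0
-- ===== SOURCE B (Python) =====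
-- def check_seat(x):
--     # Saturation: grow the component of x[0] pass by pass until it stops growing,
--     # instead of A's explicit stack DFS.
--     comp = {(x[0][0], x[0][1])}
--     for _ in range(len(x)):
--         prev = len(comp)
--         for c in x:
--             if c not in comp and any(abs(c[0] - s[0]) + abs(c[1] - s[1]) == 1 for s in comp):
--                 comp.add(c)
--         if len(comp) == prev:
--             break
--     return 1 if len(comp) == 7 else 0
-- ===== Notes on version B (the rewrite author's own statement) =====
-- stated objective: alternative
-- what changed: Replaces A's explicit-stack DFS with a dictionary-free pass-wise saturation: the component of x[0] is grown by repeated sweeps over the seat list (adding any cell 4-adjacent to the current set) until a sweep adds nothing, then its size is compared with 7.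
import Mathlib
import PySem

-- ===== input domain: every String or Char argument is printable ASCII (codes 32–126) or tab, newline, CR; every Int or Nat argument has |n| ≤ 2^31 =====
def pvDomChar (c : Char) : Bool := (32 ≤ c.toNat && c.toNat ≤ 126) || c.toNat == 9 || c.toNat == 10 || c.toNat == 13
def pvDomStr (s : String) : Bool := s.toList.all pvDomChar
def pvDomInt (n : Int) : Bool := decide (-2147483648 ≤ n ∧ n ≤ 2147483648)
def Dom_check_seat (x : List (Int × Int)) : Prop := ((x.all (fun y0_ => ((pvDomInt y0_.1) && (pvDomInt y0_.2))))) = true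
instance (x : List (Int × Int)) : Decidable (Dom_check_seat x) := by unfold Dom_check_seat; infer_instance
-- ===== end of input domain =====

-- B replaces A's stack DFS by pass-wise saturation of the component (alternative decomposition, no speed claim).

-- ===== PORT A =====
-- A's stack DFS.  The Python stack (append/pop at the END) is represented reversed:
-- head of the Lean list = top of the Python stack; visited is a Python set (PySem.Set).
def pvDirs : List (Int × Int) := [(1, 0), (0, 1), (-1, 0), (0, -1)]

def pvStep (x : List (Int × Int)) (cr cc : Int)
    (st : List (Int × Int) × PySem.Set (Int × Int)) (d : Int × Int) :
    List (Int × Int) × PySem.Set (Int × Int) :=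
  if ((cr + d.1, cc + d.2) ∈ x ∧ (cr + d.1, cc + d.2) ∉ st.2) then
    ((cr + d.1, cc + d.2) :: st.1, PySem.Set.add st.2 (cr + d.1, cc + d.2))
  else st

-- termination measure for the while loop: unvisited cells (twice) plus stack size
def pvMeas (x stack visited : List (Int × Int)) : Nat :=
  2 * ((PySem.List.dedup x).filter (fun a => decide (a ∉ visited))).length + stack.length

theorem pvFilt_lt (p q : Int × Int → Bool) (himp : ∀ a, p a = true → q a = true)
    (c : Int × Int) (hpc : p c = false) (hqc : q c = true) :
    ∀ l : List (Int × Int), c ∈ l → (l.filter p).length < (l.filter q).length := by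
  intro l
  induction l with
  | nil => intro h; cases h
  | cons a l ih =>
    intro hc
    have hle : (l.filter p).length ≤ (l.filter q).length := by
      rw [← List.countP_eq_length_filter, ← List.countP_eq_length_filter]
      exact List.countP_mono_left (fun a _ => himp a)
    rcases List.mem_cons.mp hc with rfl | hal
    · rw [List.filter_cons, List.filter_cons, hpc, hqc]
      simp only [Bool.false_eq_true, if_false, if_true, List.length_cons]
      omega
    · have hlt := ih hal
      rw [List.filter_cons, List.filter_cons]
      cases hp : p a
      · cases hq : q a <;>
          simp only [Bool.false_eq_true, if_false, if_true, List.length_cons] <;> omega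
      · rw [himp a hp]
        simp only [if_true, List.length_cons]; omega

theorem pvScan_meas (x : List (Int × Int)) (cr cc : Int) (ds : List (Int × Int))
    (s v : List (Int × Int)) :
    pvMeas x (List.foldl (pvStep x cr cc) (s, v) ds).1
      (List.foldl (pvStep x cr cc) (s, v) ds).2 ≤ pvMeas x s v := by
  induction ds generalizing s v with
  | nil => exact le_refl _
  | cons d ds ih =>
    rw [List.foldl_cons]
    by_cases h : ((cr + d.1, cc + d.2) ∈ x ∧ (cr + d.1, cc + d.2) ∉ v)
    · have hstep : pvStep x cr cc (s, v) d =
          ((cr + d.1, cc + d.2) :: s, PySem.Set.add v (cr + d.1, cc + d.2)) := by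
        simp only [pvStep, if_pos h]
      rw [hstep]
      refine le_trans (ih _ _) ?_
      rw [PySem.Set.add_of_not_mem h.2]
      have hlt : ((PySem.List.dedup x).filter
            (fun a => decide (a ∉ v ++ [(cr + d.1, cc + d.2)]))).length <
          ((PySem.List.dedup x).filter (fun a => decide (a ∉ v))).length := by
        exact pvFilt_lt _ _
          (by intro a ha
              simp only [decide_eq_true_eq, List.mem_append, List.mem_singleton] at *
              tauto)
          (cr + d.1, cc + d.2) (by simp) (by simp [h.2]) _
          ((PySem.List.mem_dedup x _).mpr h.1)
      unfold pvMeas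
      simp only [List.length_cons]
      omega
    · have hstep : pvStep x cr cc (s, v) d = (s, v) := by
        simp only [pvStep, if_neg h]
      rw [hstep]
      exact ih s v

def pvLoopA (x : List (Int × Int)) : List (Int × Int) → PySem.Set (Int × Int) → List (Int × Int)
  | [], visited => visited
  | (cr, cc) :: rest, visited =>
    let st := List.foldl (pvStep x cr cc) (rest, visited) pvDirs
    pvLoopA x st.1 st.2
termination_by stack visited => pvMeas x stack visited
decreasing_by
  calc pvMeas x (List.foldl (pvStep x cr cc) (rest, visited) pvDirs).1
        (List.foldl (pvStep x cr cc) (rest, visited) pvDirs).2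
      ≤ pvMeas x rest visited := pvScan_meas x cr cc pvDirs rest visited
    _ < pvMeas x ((cr, cc) :: rest) visited := by
        simp only [pvMeas, List.length_cons]; omega

def check_seat (x : List (Int × Int)) : Int :=
  match x with
  | [] => 0  -- x[0] raises IndexError in Python: excluded by Pre_check_seat
  | (r, c) :: _ =>
    let visited := pvLoopA x [(r, c)] [(r, c)]
    if visited.length = 7 then 1 else 0

-- ===== PORT B =====
-- one candidate test: 'if c not in comp and any(|dr|+|dc| == 1 for s in comp): comp.add(c)'
def pvAddB (S : PySem.Set (Int × Int)) (c : Int × Int) : PySem.Set (Int × Int) :=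
  if (c ∉ S ∧ ∃ s ∈ S, (c.1 - s.1).natAbs + (c.2 - s.2).natAbs = 1) then PySem.Set.add S c
  else S

-- one pass 'for c in x: …' over the seat list
def pvPassB (x : List (Int × Int)) (S : PySem.Set (Int × Int)) : PySem.Set (Int × Int) :=
  x.foldl pvAddB S

-- 'for _ in range(len(x)): … if len(comp) == prev: break' — break ported as a done-flag
def pvIterB (x : List (Int × Int)) (p : Int × Int) : PySem.Set (Int × Int) × Bool :=
  (List.range x.length).foldl
    (fun st _ =>
      if st.2 then st
      else
        let prev := st.1.length
        let S := pvPassB x st.1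
        (S, decide (S.length = prev)))
    ([p], false)

def check_seat_alt (x : List (Int × Int)) : Int :=
  match x with
  | [] => 0  -- x[0] raises IndexError in Python: excluded by Pre_check_seat
  | (r, c) :: _ =>
    let comp := (pvIterB x (r, c)).1
    if comp.length = 7 then 1 else 0

-- ===== PRECONDITION & SPEC =====
-- A evaluates x[0] first, so the empty list raises IndexError; everything else returns.
def Pre_check_seat (x : List (Int × Int)) : Prop := x ≠ []
instance (x : List (Int × Int)) : Decidable (Pre_check_seat x) := by
  unfold Pre_check_seat; infer_instance

def pvWitness_check_seat : (List (Int × Int)) :=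
  [(0, 0), (0, 1), (0, 2), (0, 3), (0, 4), (0, 5), (0, 6)]

def Spec_check_seat (x : List (Int × Int)) (out : Int) : Prop := out = check_seat_alt x
instance (x : List (Int × Int)) (out : Int) : Decidable (Spec_check_seat x out) := by
  unfold Spec_check_seat; infer_instance

-- ===== CLAIM (what is proved, stated in full; the proofs are below) =====
def Claim_equal_check_seat : Prop :=
  ∀ (x : List (Int × Int)), Dom_check_seat x → Pre_check_seat x →
    Spec_check_seat x (check_seat x)

-- ===== LEMMAS AND PROOFS =====
-- 4-adjacency of two cells
def pvAdj (s c : Int × Int) : Prop := (c.1 - s.1).natAbs + (c.2 - s.2).natAbs = 1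

-- W contains, with each of its cells, all adjacent cells of x
def pvClosedIn (x W : List (Int × Int)) : Prop :=
  ∀ s ∈ W, ∀ c ∈ x, pvAdj s c → c ∈ W

theorem pvAdj_offset (cr cc : Int) (d : Int × Int) (hd : d.1.natAbs + d.2.natAbs = 1) :
    pvAdj (cr, cc) (cr + d.1, cc + d.2) := by
  unfold pvAdj
  simp only []
  omega

theorem pvAdj_char (s c : Int × Int) (h : pvAdj s c) :
    ∃ d ∈ pvDirs, c = (s.1 + d.1, s.2 + d.2) := by
  unfold pvAdj at h
  have hd : (c.1 - s.1 = 1 ∧ c.2 - s.2 = 0) ∨ (c.1 - s.1 = 0 ∧ c.2 - s.2 = 1) ∨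
      (c.1 - s.1 = -1 ∧ c.2 - s.2 = 0) ∨ (c.1 - s.1 = 0 ∧ c.2 - s.2 = -1) := by omega
  rcases hd with ⟨h1, h2⟩ | ⟨h1, h2⟩ | ⟨h1, h2⟩ | ⟨h1, h2⟩
  · exact ⟨(1, 0), by simp [pvDirs], by obtain ⟨c1, c2⟩ := c; simp_all; omega⟩
  · exact ⟨(0, 1), by simp [pvDirs], by obtain ⟨c1, c2⟩ := c; simp_all; omega⟩
  · exact ⟨(-1, 0), by simp [pvDirs], by obtain ⟨c1, c2⟩ := c; simp_all; omega⟩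
  · exact ⟨(0, -1), by simp [pvDirs], by obtain ⟨c1, c2⟩ := c; simp_all; omega⟩

-- ----- A side: the scan of the four directions -----
theorem pvScan_master (x : List (Int × Int)) (cr cc : Int) :
    ∀ (ds : List (Int × Int)) (s v : List (Int × Int)),
    (∀ d ∈ ds, d.1.natAbs + d.2.natAbs = 1) →
    (∀ a ∈ v, a ∈ (List.foldl (pvStep x cr cc) (s, v) ds).2) ∧
    (∀ q ∈ s, q ∈ (List.foldl (pvStep x cr cc) (s, v) ds).1) ∧
    (∀ q ∈ (List.foldl (pvStep x cr cc) (s, v) ds).1,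
        q ∈ s ∨ q ∈ (List.foldl (pvStep x cr cc) (s, v) ds).2) ∧
    (∀ a ∈ (List.foldl (pvStep x cr cc) (s, v) ds).2,
        a ∈ v ∨ (a ∈ x ∧ pvAdj (cr, cc) a ∧ a ∈ (List.foldl (pvStep x cr cc) (s, v) ds).1)) ∧
    (v.Nodup → (List.foldl (pvStep x cr cc) (s, v) ds).2.Nodup) ∧
    (∀ d ∈ ds, (cr + d.1, cc + d.2) ∈ x →
        (cr + d.1, cc + d.2) ∈ (List.foldl (pvStep x cr cc) (s, v) ds).2) := by
  intro ds
  induction ds with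
  | nil =>
    intro s v _
    refine ⟨fun a ha => ha, fun q hq => hq, fun q hq => Or.inl hq,
      fun a ha => Or.inl ha, fun h => h, fun d hd => absurd hd (List.not_mem_nil)⟩
  | cons d ds ih =>
    intro s v hds
    have hd1 : d.1.natAbs + d.2.natAbs = 1 := hds d List.mem_cons_self
    have hds' : ∀ d' ∈ ds, d'.1.natAbs + d'.2.natAbs = 1 :=
      fun d' hd' => hds d' (List.mem_cons_of_mem d hd')
    rw [List.foldl_cons]
    by_cases h : ((cr + d.1, cc + d.2) ∈ x ∧ (cr + d.1, cc + d.2) ∉ v)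
    · have hstep : pvStep x cr cc (s, v) d =
          ((cr + d.1, cc + d.2) :: s, PySem.Set.add v (cr + d.1, cc + d.2)) := by
        simp only [pvStep, if_pos h]
      rw [hstep]
      obtain ⟨i1, i2, i3, i4, i5, i6⟩ :=
        ih ((cr + d.1, cc + d.2) :: s) (PySem.Set.add v (cr + d.1, cc + d.2)) hds'
      have hmemv : ∀ a ∈ v, a ∈ PySem.Set.add v (cr + d.1, cc + d.2) :=
        fun a ha => (PySem.Set.mem_add _ _ _).mpr (Or.inl ha)
      have hmemc : (cr + d.1, cc + d.2) ∈ PySem.Set.add v (cr + d.1, cc + d.2) :=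
        (PySem.Set.mem_add _ _ _).mpr (Or.inr rfl)
      refine ⟨fun a ha => i1 a (hmemv a ha),
        fun q hq => i2 q (List.mem_cons_of_mem _ hq), ?_, ?_, ?_, ?_⟩
      · intro q hq
        rcases i3 q hq with hq' | hq'
        · rcases List.mem_cons.mp hq' with rfl | hq''
          · exact Or.inr (i1 _ hmemc)
          · exact Or.inl hq''
        · exact Or.inr hq'
      · intro a ha
        rcases i4 a ha with ha' | ha'
        · rcases (PySem.Set.mem_add _ _ _).mp ha' with ha'' | rfl
          · exact Or.inl ha''
          · exact Or.inr ⟨h.1, pvAdj_offset cr cc d hd1, i2 _ List.mem_cons_self⟩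
        · exact Or.inr ha'
      · intro hnd
        exact i5 (PySem.Set.nodup_add _ _ hnd)
      · intro d' hd' hx
        rcases List.mem_cons.mp hd' with rfl | hd''
        · exact i1 _ hmemc
        · exact i6 d' hd'' hx
    · have hstep : pvStep x cr cc (s, v) d = (s, v) := by
        simp only [pvStep, if_neg h]
      rw [hstep]
      obtain ⟨i1, i2, i3, i4, i5, i6⟩ := ih s v hds'
      refine ⟨i1, i2, i3, i4, i5, ?_⟩
      intro d' hd' hx
      rcases List.mem_cons.mp hd' with rfl | hd''
      · have hv : (cr + d'.1, cc + d'.2) ∈ v := by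
          by_contra hv
          exact h ⟨hx, hv⟩
        exact i1 _ hv
      · exact i6 d' hd'' hx

-- ----- A side: the whole while loop -----
theorem pvLoopA_master (x : List (Int × Int)) : ∀ (stack visited : List (Int × Int)),
    (∀ q ∈ stack, q ∈ visited) →
    (∀ a ∈ visited, a ∈ stack ∨ ∀ c ∈ x, pvAdj a c → c ∈ visited) →
    visited.Nodup →
    (∀ a ∈ visited, a ∈ pvLoopA x stack visited) ∧
    (pvLoopA x stack visited).Nodup ∧
    pvClosedIn x (pvLoopA x stack visited) ∧
    (∀ W, pvClosedIn x W → (∀ q ∈ stack, q ∈ W) → (∀ a ∈ visited, a ∈ W) →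
        ∀ a ∈ pvLoopA x stack visited, a ∈ W) := by
  intro stack visited
  induction stack, visited using pvLoopA.induct x with
  | case1 visited =>
    intro _ h2 h3
    rw [pvLoopA]
    refine ⟨fun a ha => ha, h3, ?_, fun W _ _ hvW a ha => hvW a ha⟩
    intro a ha c hc hadj
    rcases h2 a ha with h | h
    · cases h
    · exact h c hc hadj
  | case2 cr cc rest visited st ih =>
    intro h1 h2 h3
    have hds : ∀ d ∈ pvDirs, d.1.natAbs + d.2.natAbs = 1 := by
      intro d hd
      simp only [pvDirs, List.mem_cons, List.not_mem_nil, or_false] at hd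
      rcases hd with rfl | rfl | rfl | rfl <;> decide
    obtain ⟨s1, s2, s3, s4, s5, s6⟩ := pvScan_master x cr cc pvDirs rest visited hds
    have hcrv : (cr, cc) ∈ visited := h1 _ List.mem_cons_self
    have h1' : ∀ q ∈ st.1, q ∈ st.2 := by
      intro q hq
      rcases s3 q hq with hq' | hq'
      · exact s1 q (h1 q (List.mem_cons_of_mem _ hq'))
      · exact hq'
    have h2' : ∀ a ∈ st.2, a ∈ st.1 ∨ ∀ c ∈ x, pvAdj a c → c ∈ st.2 := by
      intro a ha
      rcases s4 a ha with ha' | ha'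
      · rcases h2 a ha' with hst | hcl
        · rcases List.mem_cons.mp hst with rfl | hrest
          · refine Or.inr ?_
            intro c hc hadj
            obtain ⟨d, hd, rfl⟩ := pvAdj_char _ c hadj
            exact s6 d hd hc
          · exact Or.inl (s2 a hrest)
        · exact Or.inr fun c hc hadj => s1 c (hcl c hc hadj)
      · exact Or.inl ha'.2.2
    have h3' : st.2.Nodup := s5 h3
    obtain ⟨j1, j2, j3, j4⟩ := ih h1' h2' h3'
    have heq : pvLoopA x ((cr, cc) :: rest) visited = pvLoopA x st.1 st.2 := by
      rw [pvLoopA]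
    rw [heq]
    refine ⟨fun a ha => j1 a (s1 a ha), j2, j3, ?_⟩
    intro W hW hsW hvW
    have hst2W : ∀ a ∈ st.2, a ∈ W := by
      intro a ha
      rcases s4 a ha with ha' | ha'
      · exact hvW a ha'
      · exact hW (cr, cc) (hsW _ List.mem_cons_self) a ha'.1 ha'.2.1
    have hst1W : ∀ q ∈ st.1, q ∈ W := by
      intro q hq
      rcases s3 q hq with hq' | hq'
      · exact hsW q (List.mem_cons_of_mem _ hq')
      · exact hst2W q hq'
    exact j4 W hW hst1W hst2W

-- ----- B side -----
theorem pvAddB_pos (S : PySem.Set (Int × Int)) (c : Int × Int)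
    (h : c ∉ S ∧ ∃ s ∈ S, (c.1 - s.1).natAbs + (c.2 - s.2).natAbs = 1) :
    pvAddB S c = S ++ [c] := by
  unfold pvAddB
  rw [if_pos h, PySem.Set.add_of_not_mem h.1]

theorem pvAddB_neg (S : PySem.Set (Int × Int)) (c : Int × Int)
    (h : ¬(c ∉ S ∧ ∃ s ∈ S, (c.1 - s.1).natAbs + (c.2 - s.2).natAbs = 1)) :
    pvAddB S c = S := by
  unfold pvAddB
  rw [if_neg h]

theorem pvPassB_append (l : List (Int × Int)) :
    ∀ S : PySem.Set (Int × Int), ∃ ext, List.foldl pvAddB S l = S ++ ext := by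
  induction l with
  | nil => exact fun S => ⟨[], by simp⟩
  | cons c l ih =>
    intro S
    rw [List.foldl_cons]
    by_cases h : (c ∉ S ∧ ∃ s ∈ S, (c.1 - s.1).natAbs + (c.2 - s.2).natAbs = 1)
    · rw [pvAddB_pos S c h]
      obtain ⟨ext, hext⟩ := ih (S ++ [c])
      exact ⟨[c] ++ ext, by rw [hext, List.append_assoc]⟩
    · rw [pvAddB_neg S c h]
      exact ih S

theorem pvPassB_mono (l : List (Int × Int)) (S : PySem.Set (Int × Int)) (a : Int × Int)
    (ha : a ∈ S) : a ∈ List.foldl pvAddB S l := by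
  obtain ⟨ext, hext⟩ := pvPassB_append l S
  rw [hext]
  exact List.mem_append_left _ ha

theorem pvPassB_src (l : List (Int × Int)) :
    ∀ (S : PySem.Set (Int × Int)) (a : Int × Int),
      a ∈ List.foldl pvAddB S l → a ∈ S ∨ a ∈ l := by
  induction l with
  | nil => exact fun S a ha => Or.inl ha
  | cons c l ih =>
    intro S a ha
    rw [List.foldl_cons] at ha
    rcases ih _ a ha with hS | hl
    · by_cases h : (c ∉ S ∧ ∃ s ∈ S, (c.1 - s.1).natAbs + (c.2 - s.2).natAbs = 1)
      · rw [pvAddB_pos S c h] at hS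
        rcases List.mem_append.mp hS with hS' | hS'
        · exact Or.inl hS'
        · exact Or.inr (List.mem_cons.mpr (Or.inl (List.mem_singleton.mp hS')))
      · rw [pvAddB_neg S c h] at hS
        exact Or.inl hS
    · exact Or.inr (List.mem_cons_of_mem _ hl)

theorem pvPassB_nodup (l : List (Int × Int)) :
    ∀ S : PySem.Set (Int × Int), S.Nodup → (List.foldl pvAddB S l).Nodup := by
  induction l with
  | nil => exact fun S h => h
  | cons c l ih =>
    intro S h
    rw [List.foldl_cons]
    apply ih
    by_cases hg : (c ∉ S ∧ ∃ s ∈ S, (c.1 - s.1).natAbs + (c.2 - s.2).natAbs = 1)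
    · unfold pvAddB
      rw [if_pos hg]
      exact PySem.Set.nodup_add _ _ h
    · rw [pvAddB_neg S c hg]
      exact h

theorem pvPassB_upper (x W : List (Int × Int)) (hW : pvClosedIn x W) :
    ∀ (l : List (Int × Int)) (S : PySem.Set (Int × Int)), (∀ c ∈ l, c ∈ x) →
      (∀ a ∈ S, a ∈ W) → ∀ a ∈ List.foldl pvAddB S l, a ∈ W := by
  intro l
  induction l with
  | nil => exact fun S _ hS a ha => hS a ha
  | cons c l ih =>
    intro S hl hS a ha
    rw [List.foldl_cons] at ha
    refine ih (pvAddB S c) (fun c' hc' => hl c' (List.mem_cons_of_mem _ hc')) ?_ a ha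
    intro b hb
    by_cases h : (c ∉ S ∧ ∃ s ∈ S, (c.1 - s.1).natAbs + (c.2 - s.2).natAbs = 1)
    · rw [pvAddB_pos S c h] at hb
      rcases List.mem_append.mp hb with hb' | hb'
      · exact hS b hb'
      · obtain ⟨s, hsS, hadj⟩ := h.2
        have hbc : b = c := List.mem_singleton.mp hb'
        subst hbc
        exact hW s (hS s hsS) b (hl b List.mem_cons_self) hadj
    · rw [pvAddB_neg S c h] at hb
      exact hS b hb

theorem pvPassB_complete (x : List (Int × Int)) (S : PySem.Set (Int × Int)) (c : Int × Int)
    (hc : c ∈ x) (hadj : ∃ s ∈ S, pvAdj s c) : c ∈ pvPassB x S := by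
  obtain ⟨l1, l2, rfl⟩ := List.append_of_mem hc
  unfold pvPassB
  rw [List.foldl_append, List.foldl_cons]
  apply pvPassB_mono
  have hsub : ∀ a ∈ S, a ∈ List.foldl pvAddB S l1 := fun a ha => pvPassB_mono l1 S a ha
  by_cases h : (c ∉ List.foldl pvAddB S l1 ∧
      ∃ s ∈ List.foldl pvAddB S l1, (c.1 - s.1).natAbs + (c.2 - s.2).natAbs = 1)
  · rw [pvAddB_pos _ c h]
    exact List.mem_append_right _ (List.mem_singleton_self c)
  · rw [pvAddB_neg _ c h]
    obtain ⟨s, hsS, hadj'⟩ := hadj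
    have hex : ∃ s ∈ List.foldl pvAddB S l1,
        (c.1 - s.1).natAbs + (c.2 - s.2).natAbs = 1 := ⟨s, hsub s hsS, hadj'⟩
    by_contra hcm
    exact h ⟨hcm, hex⟩

-- the bounded-loop-with-break, as a plain Nat recursion (proof helper)
def pvIterAux (x : List (Int × Int)) (p : Int × Int) : Nat → PySem.Set (Int × Int) × Bool
  | 0 => ([p], false)
  | n + 1 =>
    let st := pvIterAux x p n
    if st.2 then st
    else (pvPassB x st.1, decide ((pvPassB x st.1).length = st.1.length))

theorem pvIterB_eq (x : List (Int × Int)) (p : Int × Int) :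
    pvIterB x p = pvIterAux x p x.length := by
  unfold pvIterB
  generalize x.length = n
  induction n with
  | zero => rfl
  | succ n ih =>
    rw [List.range_succ, List.foldl_append, ih, List.foldl_cons, List.foldl_nil]
    rfl

theorem pvIterAux_step (x : List (Int × Int)) (p : Int × Int) (n : Nat) :
    pvIterAux x p (n + 1) =
      (if (pvIterAux x p n).2 then pvIterAux x p n
       else (pvPassB x (pvIterAux x p n).1,
         decide ((pvPassB x (pvIterAux x p n).1).length = (pvIterAux x p n).1.length))) := rfl

theorem pvIterAux_step_true (x : List (Int × Int)) (p : Int × Int) (n : Nat)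
    (h : (pvIterAux x p n).2 = true) : pvIterAux x p (n + 1) = pvIterAux x p n := by
  rw [pvIterAux_step, h]
  simp

theorem pvIterAux_step_false (x : List (Int × Int)) (p : Int × Int) (n : Nat)
    (h : (pvIterAux x p n).2 = false) :
    pvIterAux x p (n + 1) = (pvPassB x (pvIterAux x p n).1,
      decide ((pvPassB x (pvIterAux x p n).1).length = (pvIterAux x p n).1.length)) := by
  rw [pvIterAux_step, h]
  simp

theorem pvIterAux_inv (x : List (Int × Int)) (p : Int × Int) (n : Nat) :
    (pvIterAux x p n).1.Nodup ∧ p ∈ (pvIterAux x p n).1 ∧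
    (∀ a ∈ (pvIterAux x p n).1, a = p ∨ a ∈ x) ∧
    ((pvIterAux x p n).2 = true → pvPassB x (pvIterAux x p n).1 = (pvIterAux x p n).1) := by
  induction n with
  | zero =>
    refine ⟨List.nodup_singleton p, List.mem_singleton_self p, ?_, ?_⟩
    · intro a ha
      exact Or.inl (List.mem_singleton.mp ha)
    · intro h
      exact absurd h (by simp [pvIterAux])
  | succ n ih =>
    obtain ⟨i1, i2, i3, i4⟩ := ih
    cases hflag : (pvIterAux x p n).2
    · rw [pvIterAux_step_false x p n hflag]
      refine ⟨pvPassB_nodup x _ i1, pvPassB_mono x _ p i2, ?_, ?_⟩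
      · intro a ha
        rcases pvPassB_src x _ a ha with hS | hx
        · exact i3 a hS
        · exact Or.inr hx
      · intro hlen
        simp only [decide_eq_true_eq] at hlen
        obtain ⟨ext, hext⟩ := pvPassB_append x (pvIterAux x p n).1
        have hlext := congrArg List.length hext
        simp only [List.length_append] at hlext
        have hnil : ext = [] := by
          apply List.length_eq_zero_iff.mp
          unfold pvPassB at hlen
          omega
        have hfix : List.foldl pvAddB (pvIterAux x p n).1 x = (pvIterAux x p n).1 := by
          rw [hext, hnil, List.append_nil]
        show pvPassB x (pvPassB x (pvIterAux x p n).1) = pvPassB x (pvIterAux x p n).1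
        unfold pvPassB
        rw [hfix]
        exact hfix
    · rw [pvIterAux_step_true x p n hflag]
      exact ⟨i1, i2, i3, i4⟩

theorem pvIterAux_upper (x W : List (Int × Int)) (hW : pvClosedIn x W) (p : Int × Int)
    (hp : p ∈ W) (n : Nat) : ∀ a ∈ (pvIterAux x p n).1, a ∈ W := by
  induction n with
  | zero =>
    intro a ha
    rw [List.mem_singleton.mp ha]
    exact hp
  | succ n ih =>
    cases hflag : (pvIterAux x p n).2
    · rw [pvIterAux_step_false x p n hflag]
      exact pvPassB_upper x W hW x _ (fun c hc => hc) ih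
    · rw [pvIterAux_step_true x p n hflag]
      exact ih

theorem pvIterAux_growth (x : List (Int × Int)) (p : Int × Int) :
    ∀ n : Nat, (pvIterAux x p n).2 = false → n + 1 ≤ (pvIterAux x p n).1.length := by
  intro n
  induction n with
  | zero => intro _; simp [pvIterAux]
  | succ n ih =>
    intro hfalse
    cases hflag : (pvIterAux x p n).2
    · rw [pvIterAux_step_false x p n hflag] at hfalse ⊢
      show n + 1 + 1 ≤ (pvPassB x (pvIterAux x p n).1).length
      have hfalse' : (decide ((pvPassB x (pvIterAux x p n).1).length =
          (pvIterAux x p n).1.length)) = false := hfalse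
      have hne : ¬((pvPassB x (pvIterAux x p n).1).length = (pvIterAux x p n).1.length) :=
        of_decide_eq_false hfalse'
      obtain ⟨ext, hext⟩ := pvPassB_append x (pvIterAux x p n).1
      have hlen := congrArg List.length hext
      simp only [List.length_append] at hlen
      have hn := ih hflag
      unfold pvPassB at hne ⊢
      omega
    · rw [pvIterAux_step_true x p n hflag] at hfalse
      rw [hflag] at hfalse
      cases hfalse

theorem pvIterAux_fixed (x : List (Int × Int)) (p : Int × Int) (hp : p ∈ x) :
    pvPassB x (pvIterAux x p x.length).1 = (pvIterAux x p x.length).1 := by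
  obtain ⟨i1, i2, i3, i4⟩ := pvIterAux_inv x p x.length
  cases hflag : (pvIterAux x p x.length).2
  · exfalso
    have hgrow := pvIterAux_growth x p x.length hflag
    have hsub : ∀ a ∈ (pvIterAux x p x.length).1, a ∈ x := by
      intro a ha
      rcases i3 a ha with rfl | hax
      · exact hp
      · exact hax
    have hcard : (pvIterAux x p x.length).1.length ≤ x.length := by
      calc (pvIterAux x p x.length).1.length
          = (pvIterAux x p x.length).1.toFinset.card := (List.toFinset_card_of_nodup i1).symm
        _ ≤ x.toFinset.card := by
            apply Finset.card_le_card
            intro a ha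
            rw [List.mem_toFinset] at *
            exact hsub a ha
        _ ≤ x.length := List.toFinset_card_le x
    omega
  · exact i4 hflag

theorem pvIterAux_closed (x : List (Int × Int)) (p : Int × Int) (hp : p ∈ x) :
    pvClosedIn x (pvIterAux x p x.length).1 := by
  intro a ha c hc hadj
  have : c ∈ pvPassB x (pvIterAux x p x.length).1 :=
    pvPassB_complete x _ c hc ⟨a, ha, hadj⟩
  rwa [pvIterAux_fixed x p hp] at this

-- ===== VERDICT (by name: the statement is the Claim_ definition above) =====
theorem check_seat_spec : Claim_equal_check_seat := by
  intro x _ hpre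
  unfold Spec_check_seat
  match x with
  | [] => exact absurd rfl hpre
  | (r, c) :: t =>
    show check_seat ((r, c) :: t) = check_seat_alt ((r, c) :: t)
    rw [check_seat, check_seat_alt]
    have hp : (r, c) ∈ (r, c) :: t := List.mem_cons_self
    obtain ⟨a1, a2, a3, a4⟩ := pvLoopA_master ((r, c) :: t) [(r, c)] [(r, c)]
      (fun q hq => hq) (fun a ha => Or.inl ha) (List.nodup_singleton _)
    obtain ⟨i1, i2, i3, _⟩ := pvIterAux_inv ((r, c) :: t) (r, c) (((r, c) :: t).length)
    have hFclosed := pvIterAux_closed ((r, c) :: t) (r, c) hp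
    have hpV : (r, c) ∈ pvLoopA ((r, c) :: t) [(r, c)] [(r, c)] :=
      a1 _ (List.mem_singleton_self _)
    have hVF : ∀ a ∈ pvLoopA ((r, c) :: t) [(r, c)] [(r, c)],
        a ∈ (pvIterAux ((r, c) :: t) (r, c) (((r, c) :: t).length)).1 := by
      apply a4 _ hFclosed
      · intro q hq
        rw [List.mem_singleton.mp hq]
        exact i2
      · intro a ha
        rw [List.mem_singleton.mp ha]
        exact i2
    have hFV : ∀ a ∈ (pvIterAux ((r, c) :: t) (r, c) (((r, c) :: t).length)).1,
        a ∈ pvLoopA ((r, c) :: t) [(r, c)] [(r, c)] :=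
      pvIterAux_upper _ _ a3 _ hpV _
    have hlen : (pvLoopA ((r, c) :: t) [(r, c)] [(r, c)]).length =
        ((pvIterAux ((r, c) :: t) (r, c) (((r, c) :: t).length)).1).length := by
      rw [← List.toFinset_card_of_nodup a2, ← List.toFinset_card_of_nodup i1]
      congr 1
      apply Finset.ext
      intro a
      rw [List.mem_toFinset, List.mem_toFinset]
      exact ⟨hVF a, hFV a⟩
    rw [pvIterB_eq]
    rw [hlen]
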